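-- pv_equiv track=rewrite | github.com/GitMonsters/octotetrahedral-agi | arc-puzzle-catalog/re-arc/solves/7df226b6/solver.py | _all_solid_rectangles
-- ===== SOURCE A (Python) =====
-- def _prefix_for_color(grid, color):
--     h, w = len(grid), len(grid[0])
--     pref = [[0] * (w + 1) for _ in range(h + 1)]
--     for r in range(h):
--         row_sum = 0
--         for c in range(w):
--             row_sum += 1 if grid[r][c] == color else 0
--             pref[r + 1][c + 1] = pref[r][c + 1] + row_sum
--     return pref
--
-- def _rect_count(pref, top, left, bottom, right):
--     return (
--         pref[bottom + 1][right + 1]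
--         - pref[top][right + 1]
--         - pref[bottom + 1][left]
--         + pref[top][left]
--     )
--
-- def _all_solid_rectangles(grid, color):
--     h, w = len(grid), len(grid[0])
--     pref = _prefix_for_color(grid, color)
--     rects = []
--     for top in range(h):
--         for left in range(w):
--             for bottom in range(top, h):
--                 for right in range(left, w):
--                     area = (bottom - top + 1) * (right - left + 1)
--                     if _rect_count(pref, top, left, bottom, right) == area:
--                         rects.append((top, left, bottom, right))
--     return rects
-- ===== SOURCE B (Python) =====
-- def _all_solid_rectangles(grid, color):
--     h, w = len(grid), len(grid[0])
--     rects = []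
--     for top in range(h):
--         for left in range(w):
--             for bottom in range(top, h):
--                 for right in range(left, w):
--                     if all(grid[r][c] == color
--                            for r in range(top, bottom + 1)
--                            for c in range(left, right + 1)):
--                         rects.append((top, left, bottom, right))
--     return rects
-- ===== Notes on version B (the rewrite author's own statement) =====
-- stated objective: simpler
-- what changed: Removed the prefix-sum table and the area/count arithmetic entirely: each candidate rectangle is tested for solidity by directly scanning its own cells with all(), keeping the same four-loop enumeration order.
import Mathlib
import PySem

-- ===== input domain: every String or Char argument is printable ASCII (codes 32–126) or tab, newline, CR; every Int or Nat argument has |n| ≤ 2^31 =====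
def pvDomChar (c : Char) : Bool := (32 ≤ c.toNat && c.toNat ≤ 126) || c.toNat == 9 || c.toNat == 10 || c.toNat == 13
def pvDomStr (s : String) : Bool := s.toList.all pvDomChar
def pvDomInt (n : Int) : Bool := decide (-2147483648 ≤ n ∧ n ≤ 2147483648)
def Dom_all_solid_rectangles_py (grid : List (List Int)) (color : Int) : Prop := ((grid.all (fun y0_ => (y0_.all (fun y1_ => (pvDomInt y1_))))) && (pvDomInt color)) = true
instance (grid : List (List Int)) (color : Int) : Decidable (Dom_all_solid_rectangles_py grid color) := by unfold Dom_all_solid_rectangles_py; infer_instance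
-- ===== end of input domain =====

-- B drops A's prefix-sum table and tests each candidate rectangle by scanning its own
-- cells directly (same four-loop enumeration order, so the output list is identical);
-- objective: simpler, not faster.

-- ===== PORT A =====
-- grid[r][c]: indices are nonnegative and in range on every access Pre_ admits, so List.getD is exact there
def pvCell (grid : List (List Int)) (r c : Nat) : Int := (grid.getD r []).getD c 0

def prefix_for_color (grid : List (List Int)) (color : Int) : List (List Int) :=
  let h := grid.length
  let w := (grid.headD []).length
  let pref : List (List Int) := List.replicate (h + 1) (List.replicate (w + 1) (0 : Int))
  (List.range h).foldl (fun pref r =>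
    ((List.range w).foldl (fun (st : Int × List (List Int)) c =>
      let row_sum := st.1 + (if pvCell grid r c == color then (1 : Int) else 0)
      (row_sum,
        st.2.set (r + 1)
          ((st.2.getD (r + 1) []).set (c + 1) ((st.2.getD r []).getD (c + 1) 0 + row_sum))))
      ((0 : Int), pref)).2) pref

def rect_count (pref : List (List Int)) (top left bottom right : Nat) : Int :=
  (pref.getD (bottom + 1) []).getD (right + 1) 0
  - (pref.getD top []).getD (right + 1) 0
  - (pref.getD (bottom + 1) []).getD left 0
  + (pref.getD top []).getD left 0

def all_solid_rectangles_py (grid : List (List Int)) (color : Int) : List (Int × Int × Int × Int) :=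
  let h := grid.length
  let w := (grid.headD []).length
  let pref := prefix_for_color grid color
  (List.range h).foldl (fun rects top =>
    (List.range w).foldl (fun rects left =>
      (List.range' top (h - top)).foldl (fun rects bottom =>
        (List.range' left (w - left)).foldl (fun rects right =>
          if rect_count pref top left bottom right ==
              ((bottom : Int) - (top : Int) + 1) * ((right : Int) - (left : Int) + 1)
          then rects ++ [((top : Int), (left : Int), (bottom : Int), (right : Int))]
          else rects) rects) rects) rects) []

-- ===== PORT B =====
def pvSolid (grid : List (List Int)) (color : Int) (top left bottom right : Nat) : Bool :=
  (List.range' top (bottom + 1 - top)).all (fun r =>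
    (List.range' left (right + 1 - left)).all (fun c => pvCell grid r c == color))

def all_solid_rectangles_py_alt (grid : List (List Int)) (color : Int) : List (Int × Int × Int × Int) :=
  let h := grid.length
  let w := (grid.headD []).length
  (List.range h).foldl (fun rects top =>
    (List.range w).foldl (fun rects left =>
      (List.range' top (h - top)).foldl (fun rects bottom =>
        (List.range' left (w - left)).foldl (fun rects right =>
          if pvSolid grid color top left bottom right
          then rects ++ [((top : Int), (left : Int), (bottom : Int), (right : Int))]
          else rects) rects) rects) rects) []

-- ===== PRECONDITION & SPEC =====
-- Pre_ excludes exactly the inputs where Python A raises IndexError: the empty grid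
-- (len(grid[0])) and ragged grids whose some row is shorter than the first row.
def Pre_all_solid_rectangles_py (grid : List (List Int)) (_color : Int) : Prop :=
  grid ≠ [] ∧ ∀ row ∈ grid, (grid.headD []).length ≤ row.length
instance (grid : List (List Int)) (color : Int) : Decidable (Pre_all_solid_rectangles_py grid color) := by unfold Pre_all_solid_rectangles_py; infer_instance

def pvWitness_all_solid_rectangles_py : List (List Int) × Int := ([[2, 1], [2, 2]], 2)

def Spec_all_solid_rectangles_py (grid : List (List Int)) (color : Int) (out : List (Int × Int × Int × Int)) : Prop := out = all_solid_rectangles_py_alt grid color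
instance (grid : List (List Int)) (color : Int) (out : List (Int × Int × Int × Int)) : Decidable (Spec_all_solid_rectangles_py grid color out) := by unfold Spec_all_solid_rectangles_py; infer_instance

-- ===== CLAIM (what is proved, stated in full; the proofs are below) =====
def Claim_equal_all_solid_rectangles_py : Prop := ∀ (grid : List (List Int)) (color : Int), Dom_all_solid_rectangles_py grid color → Pre_all_solid_rectangles_py grid color → Spec_all_solid_rectangles_py grid color (all_solid_rectangles_py grid color)

-- ===== LEMMAS AND PROOFS =====

-- indicator, row-prefix count, 2-D prefix count
def pvInd (grid : List (List Int)) (color : Int) (r c : Nat) : Int :=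
  if pvCell grid r c == color then 1 else 0

def pvRowCnt (grid : List (List Int)) (color : Int) (r C : Nat) : Int :=
  ((List.range C).map (pvInd grid color r)).sum

def pvCnt (grid : List (List Int)) (color : Int) (R C : Nat) : Int :=
  ((List.range R).map (fun r => pvRowCnt grid color r C)).sum

def pvRowPref (grid : List (List Int)) (color : Int) (i : Nat) : List Int :=
  (List.range ((grid.headD []).length + 1)).map (fun j => pvCnt grid color i j)

def pvPartRow (grid : List (List Int)) (color : Int) (r m : Nat) : List Int :=
  (List.range ((grid.headD []).length + 1)).map (fun j => if j ≤ m then pvCnt grid color (r + 1) j else 0)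

def pvPrefState (grid : List (List Int)) (color : Int) (k : Nat) : List (List Int) :=
  (List.range (k + 1)).map (pvRowPref grid color)
    ++ List.replicate (grid.length - k) (List.replicate ((grid.headD []).length + 1) (0 : Int))

def pvPartState (g : List (List Int)) (col : Int) (r m : Nat) : List (List Int) :=
  (List.range (r + 1)).map (pvRowPref g col)
    ++ pvPartRow g col r m :: List.replicate (g.length - r - 1) (List.replicate ((g.headD []).length + 1) (0 : Int))

-- generic list-access helpers
theorem pv_set_append {a : Type} (A : List a) (x y : a) (Z : List a) (i : Nat)
    (hi : i = A.length) : (A ++ x :: Z).set i y = A ++ y :: Z := by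
  subst hi; rw [List.set_append_right _ _ (le_refl _)]; simp

theorem pv_getD_append_self {a : Type} (A : List a) (x : a) (Z : List a) (d : a) (i : Nat)
    (hi : i = A.length) : (A ++ x :: Z).getD i d = x := by
  subst hi; simp [List.getD_eq_getElem?_getD]

theorem pv_replicate_pos {a : Type} (n : Nat) (h : 0 < n) (z : a) :
    List.replicate n z = z :: List.replicate (n - 1) z := by
  cases n with
  | zero => omega
  | succ k => simp [List.replicate_succ]

theorem pv_getD_append_left {a : Type} (A Z : List a) (i : Nat) (h : i < A.length) (d : a) :
    (A ++ Z).getD i d = A.getD i d := by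
  simp [List.getD_eq_getElem?_getD, List.getElem?_append_left h]

theorem pv_getD_map_range {a : Type} (n i : Nat) (f : Nat → a) (h : i < n) (d : a) :
    ((List.range n).map f).getD i d = f i := by simp [List.getD_eq_getElem?_getD, h]

-- counting identities
theorem pvRowCnt_succ (g : List (List Int)) (col : Int) (r m : Nat) :
    pvRowCnt g col r (m + 1) = pvRowCnt g col r m + pvInd g col r m := by
  simp [pvRowCnt, List.range_succ]

theorem pvCnt_succ (g : List (List Int)) (col : Int) (R C : Nat) :
    pvCnt g col (R + 1) C = pvCnt g col R C + pvRowCnt g col R C := by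
  simp [pvCnt, List.range_succ]

theorem pvCnt_zero_right (g : List (List Int)) (col : Int) (R : Nat) : pvCnt g col R 0 = 0 := by
  simp [pvCnt, pvRowCnt]

theorem pvCnt_zero_left (g : List (List Int)) (col : Int) (C : Nat) : pvCnt g col 0 C = 0 := by
  simp [pvCnt]

theorem pvRowPref_zero (g : List (List Int)) (col : Int) :
    pvRowPref g col 0 = List.replicate ((g.headD []).length + 1) 0 := by
  unfold pvRowPref
  rw [List.map_congr_left (g := fun _ => (0 : Int)) (fun j _ => pvCnt_zero_left g col j)]
  simp

theorem pvPartRow_zero (g : List (List Int)) (col : Int) (r : Nat) :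
    pvPartRow g col r 0 = List.replicate ((g.headD []).length + 1) 0 := by
  unfold pvPartRow
  rw [List.map_congr_left (g := fun _ => (0 : Int)) ?_]
  · simp
  · intro j _
    rcases Nat.eq_zero_or_pos j with rfl | hj
    · simp [pvCnt_zero_right]
    · simp [Nat.not_le.mpr hj]

theorem pvPartRow_full (g : List (List Int)) (col : Int) (r : Nat) :
    pvPartRow g col r ((g.headD []).length) = pvRowPref g col (r + 1) := by
  unfold pvPartRow pvRowPref
  apply List.map_congr_left
  intro j hj
  rw [List.mem_range] at hj
  rw [if_pos (Nat.le_of_lt_succ hj)]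

theorem pvPartRow_set (g : List (List Int)) (col : Int) (r m : Nat) :
    (pvPartRow g col r m).set (m + 1) (pvCnt g col (r + 1) (m + 1)) = pvPartRow g col r (m + 1) := by
  unfold pvPartRow
  apply List.ext_getElem (by simp)
  intro j h1 h2
  rw [List.getElem_set]
  simp only [List.getElem_map, List.getElem_range]
  by_cases hj : m + 1 = j
  · simp [← hj]
  · simp only [if_neg hj]
    split_ifs <;> first | rfl | omega

theorem pvPrefState_eq_part_zero (g : List (List Int)) (col : Int) (r : Nat) (hr : r < g.length) :
    pvPrefState g col r = pvPartState g col r 0 := by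
  unfold pvPrefState pvPartState
  rw [pvPartRow_zero, pv_replicate_pos (g.length - r) (by omega)]

theorem pvPartState_getD_succ (g : List (List Int)) (col : Int) (r m : Nat) :
    (pvPartState g col r m).getD (r + 1) [] = pvPartRow g col r m := by
  unfold pvPartState
  rw [pv_getD_append_self _ _ _ _ _ (by simp)]

theorem pvPartState_getD_self (g : List (List Int)) (col : Int) (r m : Nat) :
    (pvPartState g col r m).getD r [] = pvRowPref g col r := by
  unfold pvPartState
  rw [pv_getD_append_left _ _ _ (by simp), pv_getD_map_range _ _ _ (by omega)]

theorem pvRowPref_getD (g : List (List Int)) (col : Int) (i j : Nat)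
    (hj : j ≤ (g.headD []).length) :
    (pvRowPref g col i).getD j 0 = pvCnt g col i j := by
  unfold pvRowPref
  rw [pv_getD_map_range _ _ _ (by omega)]

-- the inner loop of _prefix_for_color fills row r+1 of the table
theorem pv_inner_loop (g : List (List Int)) (col : Int) (r : Nat) (hr : r < g.length)
    (m : Nat) (hm : m ≤ (g.headD []).length) :
    (List.range m).foldl
      (fun (st : Int × List (List Int)) c =>
        let row_sum := st.1 + (if pvCell g r c == col then (1 : Int) else 0)
        (row_sum,
          st.2.set (r + 1)
            ((st.2.getD (r + 1) []).set (c + 1) ((st.2.getD r []).getD (c + 1) 0 + row_sum))))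
      ((0 : Int), pvPrefState g col r)
    = (pvRowCnt g col r m, pvPartState g col r m) := by
  induction m with
  | zero => simp [pvRowCnt, pvPrefState_eq_part_zero g col r hr]
  | succ m ih =>
    have hm' : m < (g.headD []).length := by omega
    rw [List.range_succ, List.foldl_append, ih (by omega), List.foldl_cons, List.foldl_nil]
    dsimp only
    rw [pvPartState_getD_succ, pvPartState_getD_self,
        pvRowPref_getD g col r (m + 1) (by omega)]
    have hrs : pvRowCnt g col r m + (if pvCell g r m == col then (1 : Int) else 0)
        = pvRowCnt g col r (m + 1) := by rw [pvRowCnt_succ]; rfl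
    rw [hrs, show pvCnt g col r (m + 1) + pvRowCnt g col r (m + 1) = pvCnt g col (r + 1) (m + 1)
          from (pvCnt_succ g col r (m + 1)).symm,
        pvPartRow_set g col r m]
    unfold pvPartState
    rw [pv_set_append _ _ _ _ _ (by simp)]

-- the outer loop of _prefix_for_color
theorem pv_outer_loop (g : List (List Int)) (col : Int) (k : Nat) (hk : k ≤ g.length) :
    (List.range k).foldl
      (fun pref r =>
        ((List.range (g.headD []).length).foldl
          (fun (st : Int × List (List Int)) c =>
            let row_sum := st.1 + (if pvCell g r c == col then (1 : Int) else 0)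
            (row_sum,
              st.2.set (r + 1)
                ((st.2.getD (r + 1) []).set (c + 1) ((st.2.getD r []).getD (c + 1) 0 + row_sum))))
          ((0 : Int), pref)).2)
      (List.replicate (g.length + 1) (List.replicate ((g.headD []).length + 1) (0 : Int)))
    = pvPrefState g col k := by
  induction k with
  | zero =>
    simp only [List.range_zero, List.foldl_nil]
    unfold pvPrefState
    rw [List.range_one]
    simp [pvRowPref_zero, List.replicate_succ]
  | succ k ih =>
    rw [List.range_succ, List.foldl_append, ih (by omega), List.foldl_cons, List.foldl_nil]
    rw [pv_inner_loop g col k (by omega) _ (le_refl _)]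
    unfold pvPartState pvPrefState
    rw [pvPartRow_full, List.range_succ (n := k + 1), List.map_append,
        show g.length - k - 1 = g.length - (k + 1) by omega]
    simp

theorem prefix_eq_state (grid : List (List Int)) (color : Int) :
    prefix_for_color grid color = (List.range (grid.length + 1)).map (pvRowPref grid color) := by
  unfold prefix_for_color
  dsimp only
  rw [pv_outer_loop grid color grid.length (le_refl _)]
  unfold pvPrefState
  simp

theorem pv_pref_entry (g : List (List Int)) (col : Int) (i j : Nat)
    (hi : i ≤ g.length) (hj : j ≤ (g.headD []).length) :
    ((prefix_for_color g col).getD i []).getD j 0 = pvCnt g col i j := by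
  rw [prefix_eq_state, pv_getD_map_range _ _ _ (by omega)]
  exact pvRowPref_getD g col i j hj

theorem pvCnt_split (g : List (List Int)) (col : Int) (C R1 R2 : Nat) (h : R1 ≤ R2) :
    pvCnt g col R2 C = pvCnt g col R1 C
      + ((List.range' R1 (R2 - R1)).map (fun i => pvRowCnt g col i C)).sum := by
  unfold pvCnt
  have hr : List.range R2 = List.range R1 ++ List.range' R1 (R2 - R1) := by
    rw [List.range_eq_range' (n := R2), List.range_eq_range' (n := R1),
        show R2 = R1 + (R2 - R1) by omega, ← List.range'_append_1]
    simp
  rw [hr, List.map_append, List.sum_append]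

theorem pvRowCnt_split (g : List (List Int)) (col : Int) (i C1 C2 : Nat) (h : C1 ≤ C2) :
    pvRowCnt g col i C2 = pvRowCnt g col i C1
      + ((List.range' C1 (C2 - C1)).map (pvInd g col i)).sum := by
  unfold pvRowCnt
  have hr : List.range C2 = List.range C1 ++ List.range' C1 (C2 - C1) := by
    rw [List.range_eq_range' (n := C2), List.range_eq_range' (n := C1),
        show C2 = C1 + (C2 - C1) by omega, ← List.range'_append_1]
    simp
  rw [hr, List.map_append, List.sum_append]

theorem pv_sum_map_sub (L : List Nat) (f g : Nat → Int) :
    (L.map (fun x => f x - g x)).sum = (L.map f).sum - (L.map g).sum := by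
  induction L with
  | nil => simp
  | cons a t ih => simp only [List.map_cons, List.sum_cons]; rw [ih]; ring

theorem rect_count_eq_boxsum (grid : List (List Int)) (color : Int)
    (t l b r : Nat) (htb : t ≤ b) (hbh : b < grid.length) (hlr : l ≤ r)
    (hrw : r < (grid.headD []).length) :
    rect_count (prefix_for_color grid color) t l b r =
      ((List.range' t (b + 1 - t)).map
        (fun i => ((List.range' l (r + 1 - l)).map (pvInd grid color i)).sum)).sum := by
  unfold rect_count
  rw [pv_pref_entry grid color (b + 1) (r + 1) (by omega) (by omega),
      pv_pref_entry grid color t (r + 1) (by omega) (by omega),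
      pv_pref_entry grid color (b + 1) l (by omega) (by omega),
      pv_pref_entry grid color t l (by omega) (by omega)]
  have e1 := pvCnt_split grid color (r + 1) t (b + 1) (by omega)
  have e2 := pvCnt_split grid color l t (b + 1) (by omega)
  have e3 : ((List.range' t (b + 1 - t)).map (fun i => pvRowCnt grid color i (r + 1))).sum
          - ((List.range' t (b + 1 - t)).map (fun i => pvRowCnt grid color i l)).sum
          = ((List.range' t (b + 1 - t)).map
              (fun i => ((List.range' l (r + 1 - l)).map (pvInd grid color i)).sum)).sum := by
    rw [← pv_sum_map_sub]
    refine congrArg List.sum (List.map_congr_left ?_)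
    intro i _
    have h := pvRowCnt_split grid color i l (r + 1) (by omega)
    linarith
  linarith [e1, e2, e3]

-- bounded sums: sum ≤ B·len, with equality iff every term equals B
theorem pv_sum_bound (B : Int) (xs : List Int) (hle : ∀ x ∈ xs, x ≤ B) :
    xs.sum ≤ B * xs.length ∧ (xs.sum = B * xs.length ↔ ∀ x ∈ xs, x = B) := by
  induction xs with
  | nil => simp
  | cons x tl ih =>
    have hx := hle x (by simp)
    have htl := ih (fun y hy => hle y (by simp [hy]))
    simp only [List.sum_cons, List.length_cons, List.mem_cons]
    push_cast
    have hmul : B * ((tl.length : Int) + 1) = B * tl.length + B := by ring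
    rw [hmul]
    obtain ⟨h1, h2⟩ := htl
    constructor
    · omega
    · constructor
      · intro he
        have hxB : x = B ∧ tl.sum = B * tl.length := by omega
        intro y hy
        rcases hy with rfl | hy
        · exact hxB.1
        · exact h2.mp hxB.2 y hy
      · intro hall
        have ht : tl.sum = B * tl.length := h2.mpr (fun y hy => hall y (Or.inr hy))
        have : x = B := hall x (Or.inl rfl)
        omega

theorem cond_iff (grid : List (List Int)) (color : Int)
    (t l b r : Nat) (htb : t ≤ b) (hbh : b < grid.length) (hlr : l ≤ r)
    (hrw : r < (grid.headD []).length) :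
    (rect_count (prefix_for_color grid color) t l b r ==
      ((b : Int) - (t : Int) + 1) * ((r : Int) - (l : Int) + 1)) =
    pvSolid grid color t l b r := by
  rw [rect_count_eq_boxsum grid color t l b r htb hbh hlr hrw]
  have hW : ((r + 1 - l : Nat) : Int) = (r : Int) - l + 1 := by omega
  have hR : ((b + 1 - t : Nat) : Int) = (b : Int) - t + 1 := by omega
  have hinner : ∀ i,
      ((List.range' l (r + 1 - l)).map (pvInd grid color i)).sum ≤ ((r + 1 - l : Nat) : Int) ∧
      (((List.range' l (r + 1 - l)).map (pvInd grid color i)).sum = ((r + 1 - l : Nat) : Int) ↔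
        ∀ c ∈ List.range' l (r + 1 - l), (pvCell grid i c == color) = true) := by
    intro i
    have hb := pv_sum_bound 1 ((List.range' l (r + 1 - l)).map (pvInd grid color i))
      (by intro x hx
          obtain ⟨c, _, rfl⟩ := List.mem_map.mp hx
          unfold pvInd; split <;> omega)
    simp only [List.length_map, List.length_range', one_mul] at hb
    obtain ⟨h1, h2⟩ := hb
    refine ⟨h1, ?_⟩
    rw [h2]
    constructor
    · intro hall c hc
      have hv := hall (pvInd grid color i c) (List.mem_map.mpr ⟨c, hc, rfl⟩)
      unfold pvInd at hv
      by_cases hcc : (pvCell grid i c == color) = true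
      · exact hcc
      · rw [if_neg hcc] at hv; omega
    · intro hall x hx
      obtain ⟨c, hc, rfl⟩ := List.mem_map.mp hx
      unfold pvInd
      rw [if_pos (hall c hc)]
  have houter := pv_sum_bound ((r + 1 - l : Nat) : Int)
    ((List.range' t (b + 1 - t)).map
      (fun i => ((List.range' l (r + 1 - l)).map (pvInd grid color i)).sum))
    (by intro x hx
        obtain ⟨i, _, rfl⟩ := List.mem_map.mp hx
        exact (hinner i).1)
  simp only [List.length_map, List.length_range'] at houter
  rw [Bool.eq_iff_iff, beq_iff_eq]
  unfold pvSolid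
  simp only [List.all_eq_true]
  rw [show ((b : Int) - t + 1) * ((r : Int) - l + 1)
        = ((r + 1 - l : Nat) : Int) * ((b + 1 - t : Nat) : Int) by rw [hW, hR]; ring]
  rw [houter.2]
  constructor
  · intro hall i hi
    exact (hinner i).2.mp (hall _ (List.mem_map.mpr ⟨i, hi, rfl⟩))
  · intro hall x hx
    obtain ⟨i, hi, rfl⟩ := List.mem_map.mp hx
    exact (hinner i).2.mpr (hall i hi)

-- ===== VERDICT (by name: the statement is the Claim_ definition above) =====
theorem all_solid_rectangles_py_spec : Claim_equal_all_solid_rectangles_py := by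
  intro grid color _ _
  unfold Spec_all_solid_rectangles_py all_solid_rectangles_py all_solid_rectangles_py_alt
  dsimp only
  apply PySem.List.foldl_congr_mem
  intro acc1 top htop
  apply PySem.List.foldl_congr_mem
  intro acc2 left hleft
  apply PySem.List.foldl_congr_mem
  intro acc3 bottom hbottom
  apply PySem.List.foldl_congr_mem
  intro acc4 right hright
  rw [List.mem_range] at htop hleft
  rw [List.mem_range'_1] at hbottom hright
  rw [cond_iff grid color top left bottom right hbottom.1 (by omega) hright.1 (by omega)]
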